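-- pv_equiv track=rewrite | github.com/reachjvc/Daygame_coach | scripts/training-data/validation/pipeline_scorecard.py | _compute_contract_health
-- ===== SOURCE A (Python) =====
-- from typing import Any, Dict, Iterable, List, Optional, Sequence, Set, Tuple
--
-- def _compute_contract_health(
--     non_quarantined_ids: Set[str],
--     stage_present_ids: Dict[str, Set[str]],
-- ) -> Tuple[int, int]:
--     deps: Dict[str, List[str]] = {
--         "stage06c": ["stage06", "stage06b"],
--         "stage06d": ["stage06c"],
--         "stage06e": ["stage06d"],
--         "stage06f": ["stage06d"],
--         "stage06g": ["stage06f"],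
--         "stage06h": ["stage06d", "stage06f"],
--         "stage07": ["stage06h"],
--         "stage09": ["stage07"],
--     }
--
--     missing_required_input_count = 0
--     silent_pass_count = 0
--
--     for stage_key, dep_keys in deps.items():
--         present = stage_present_ids.get(stage_key, set())
--         for vid in present:
--             if vid not in non_quarantined_ids:
--                 continue
--             missing = [dep for dep in dep_keys if vid not in stage_present_ids.get(dep, set())]
--             if missing:
--                 missing_required_input_count += 1
--                 silent_pass_count += 1
--
--     return missing_required_input_count, silent_pass_count
-- ===== SOURCE B (Python) =====
-- def _compute_contract_health(
--     non_quarantined_ids,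
--     stage_present_ids,
-- ):
--     deps = {
--         "stage06c": ["stage06", "stage06b"],
--         "stage06d": ["stage06c"],
--         "stage06e": ["stage06d"],
--         "stage06f": ["stage06d"],
--         "stage06g": ["stage06f"],
--         "stage06h": ["stage06d", "stage06f"],
--         "stage07": ["stage06h"],
--         "stage09": ["stage07"],
--     }
--     # inverted index: video id -> set of stage keys where it is present
--     stages_of = {}
--     for key, ids in stage_present_ids.items():
--         for vid in ids:
--             stages_of.setdefault(vid, set()).add(key)
--     count = 0
--     for vid in non_quarantined_ids:
--         st = stages_of.get(vid, set())
--         for stage_key, dep_keys in deps.items():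
--             if stage_key in st and any(d not in st for d in dep_keys):
--                 count += 1
--     return count, count
-- ===== Notes on version B (the rewrite author's own statement) =====
-- stated objective: alternative
-- what changed: Inverts the data: builds an inverted index vid -> set of stages where it appears in one pass, then iterates over videos (not stages) checking each video's stage-set against the dependency table, replacing A's per-stage scans of present sets with per-video lookups in the index; returns (count, count) since A's two counters are always equal.
import Mathlib
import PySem

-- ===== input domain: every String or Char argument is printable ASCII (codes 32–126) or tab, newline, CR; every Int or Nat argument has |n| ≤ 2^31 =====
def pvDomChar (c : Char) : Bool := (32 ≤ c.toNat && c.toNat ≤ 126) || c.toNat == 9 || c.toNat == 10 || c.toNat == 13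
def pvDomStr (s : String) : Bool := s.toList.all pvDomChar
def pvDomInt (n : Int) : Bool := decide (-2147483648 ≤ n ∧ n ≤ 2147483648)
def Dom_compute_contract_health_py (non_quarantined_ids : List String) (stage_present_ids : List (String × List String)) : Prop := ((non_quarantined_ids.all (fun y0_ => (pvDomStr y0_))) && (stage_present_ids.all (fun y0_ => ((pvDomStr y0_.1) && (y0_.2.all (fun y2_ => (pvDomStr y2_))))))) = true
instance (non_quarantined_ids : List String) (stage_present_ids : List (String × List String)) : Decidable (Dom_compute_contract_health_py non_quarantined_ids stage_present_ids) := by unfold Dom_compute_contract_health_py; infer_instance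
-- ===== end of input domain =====

-- B inverts the data: an inverted index vid -> set of stages replaces A's per-stage scans
-- of present sets; same return value (objective: alternative, similar cost).

-- shared dependency table (the literal dict of both Pythons)
def pvDeps : List (String × List String) :=
  [("stage06c", ["stage06", "stage06b"]),
   ("stage06d", ["stage06c"]),
   ("stage06e", ["stage06d"]),
   ("stage06f", ["stage06d"]),
   ("stage06g", ["stage06f"]),
   ("stage06h", ["stage06d", "stage06f"]),
   ("stage07", ["stage06h"]),
   ("stage09", ["stage07"])]

-- stage_present_ids.get(k, set())  (dict lookup with default)
def spGet (spi : List (String × List String)) (k : String) : List String :=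
  PySem.Dict.getD (PySem.Dict.mk spi) k []

-- ===== PORT A =====
def compute_contract_health_py (non_quarantined_ids : List String) (stage_present_ids : List (String × List String)) : Int × Int :=
  pvDeps.foldl (fun (acc : Int × Int) kv =>
    let present := spGet stage_present_ids kv.1
    present.foldl (fun (acc2 : Int × Int) vid =>
      if !(non_quarantined_ids.contains vid) then acc2   -- continue
      else
        let missing := kv.2.filter (fun dep => !((spGet stage_present_ids dep).contains vid))
        if !missing.isEmpty then (acc2.1 + 1, acc2.2 + 1) else acc2) acc) (0, 0)

-- ===== PORT B =====
-- the inverted index: stages_of[vid] = set of stage keys whose present set holds vid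
def stagesOf (spi : List (String × List String)) : PySem.Dict String (PySem.Set String) :=
  spi.foldl (fun d kv =>
    kv.2.foldl (fun d vid =>
      d.modify vid PySem.Set.empty (fun s => PySem.Set.add s kv.1)) d)
    PySem.Dict.empty

def compute_contract_health_py_alt (non_quarantined_ids : List String) (stage_present_ids : List (String × List String)) : Int × Int :=
  let so := stagesOf stage_present_ids
  let count := non_quarantined_ids.foldl (fun (c : Int) vid =>
    let st := PySem.Dict.getD so vid PySem.Set.empty
    pvDeps.foldl (fun (c : Int) kv =>
      if PySem.Set.contains st kv.1 && kv.2.any (fun d => !(PySem.Set.contains st d)) then c + 1 else c) c) 0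
  (count, count)

-- ===== PRECONDITION & SPEC =====
-- Pre_ only states that the set/dict arguments are encoded per the type convention:
-- distinct set elements and unique dict keys, which Python's Set/Dict types guarantee;
-- it excludes no input the Python function can actually receive.
def Pre_compute_contract_health_py (non_quarantined_ids : List String) (stage_present_ids : List (String × List String)) : Prop :=
  non_quarantined_ids.Nodup ∧ (stage_present_ids.map Prod.fst).Nodup ∧ ∀ kv ∈ stage_present_ids, kv.2.Nodup
instance (non_quarantined_ids : List String) (stage_present_ids : List (String × List String)) : Decidable (Pre_compute_contract_health_py non_quarantined_ids stage_present_ids) := by unfold Pre_compute_contract_health_py; infer_instance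

def pvWitness_compute_contract_health_py : List String × (List (String × List String)) :=
  (["v1", "v2"], [("stage06d", ["v1"]), ("stage06c", ["v1", "v2"])])

def Spec_compute_contract_health_py (non_quarantined_ids : List String) (stage_present_ids : List (String × List String)) (out : Int × Int) : Prop := out = compute_contract_health_py_alt non_quarantined_ids stage_present_ids
instance (non_quarantined_ids : List String) (stage_present_ids : List (String × List String)) (out : Int × Int) : Decidable (Spec_compute_contract_health_py non_quarantined_ids stage_present_ids out) := by unfold Spec_compute_contract_health_py; infer_instance

-- ===== CLAIM (what is proved, stated in full; the proofs are below) =====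
def Claim_equal_compute_contract_health_py : Prop := ∀ (non_quarantined_ids : List String) (stage_present_ids : List (String × List String)), Dom_compute_contract_health_py non_quarantined_ids stage_present_ids → Pre_compute_contract_health_py non_quarantined_ids stage_present_ids → Spec_compute_contract_health_py non_quarantined_ids stage_present_ids (compute_contract_health_py non_quarantined_ids stage_present_ids)

-- ===== LEMMAS AND PROOFS =====

-- per-stage count through A's eyes
def cntA (nq : List String) (spi : List (String × List String)) (kv : String × List String) : Nat :=
  ((spGet spi kv.1).filter (fun v => nq.contains v && kv.2.any (fun dep => !((spGet spi dep).contains v)))).length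

-- per-stage count through B's eyes
def cntB (nq : List String) (spi : List (String × List String)) (kv : String × List String) : Nat :=
  (nq.filter (fun v =>
    PySem.Set.contains (PySem.Dict.getD (stagesOf spi) v PySem.Set.empty) kv.1 &&
    kv.2.any (fun d => !(PySem.Set.contains (PySem.Dict.getD (stagesOf spi) v PySem.Set.empty) d)))).length

-- unfolding spGet on a cons cell
theorem spGet_nil (k : String) : spGet [] k = [] := rfl

theorem spGet_cons (p : String × List String) (rest : List (String × List String)) (k : String) :
    spGet (p :: rest) k = if p.1 == k then p.2 else spGet rest k := by
  obtain ⟨k0, ids⟩ := p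
  by_cases h : k0 == k <;>
    simp [spGet, PySem.Dict.getD_eq_get?_getD, PySem.Dict.get?_mk_cons, h]

theorem spGet_nodup (spi : List (String × List String)) (h : ∀ kv ∈ spi, kv.2.Nodup) (k : String) :
    (spGet spi k).Nodup := by
  induction spi with
  | nil => rw [spGet_nil]; exact List.nodup_nil
  | cons p rest ih =>
    rw [spGet_cons]
    by_cases hp : (p.1 == k) = true
    · simpa [hp] using h p (by simp)
    · have hb : (p.1 == k) = false := by simpa using hp
      simpa [hb] using ih (fun kv hkv => h kv (by simp [hkv]))

-- membership in a first-match lookup, under unique keys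
theorem mem_spGet (spi : List (String × List String)) (hk : (spi.map Prod.fst).Nodup)
    (k v : String) : v ∈ spGet spi k ↔ ∃ kv ∈ spi, kv.1 = k ∧ v ∈ kv.2 := by
  induction spi with
  | nil => rw [spGet_nil]; simp
  | cons p rest ih =>
    rw [spGet_cons]
    simp only [List.map_cons, List.nodup_cons] at hk
    by_cases hp : (p.1 == k) = true
    · have hpk : p.1 = k := by simpa using hp
      simp only [hp, if_true]
      constructor
      · intro hv; exact ⟨p, by simp, hpk, hv⟩
      · rintro ⟨kv, hkv, hk1, hv⟩
        rcases List.mem_cons.mp hkv with h1 | h2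
        · subst h1; exact hv
        · have hnk : k ∉ rest.map Prod.fst := hpk ▸ hk.1
          exact absurd (List.mem_map.mpr ⟨kv, h2, hk1⟩) hnk
    · have hpk : p.1 ≠ k := by simpa using hp
      have hb : (p.1 == k) = false := by simpa using hp
      simp only [hb, Bool.false_eq_true, if_false]
      rw [ih hk.2]
      constructor
      · rintro ⟨kv, hkv, hk1, hv⟩; exact ⟨kv, by simp [hkv], hk1, hv⟩
      · rintro ⟨kv, hkv, hk1, hv⟩
        rcases List.mem_cons.mp hkv with h1 | h2
        · subst h1; exact absurd hk1 hpk
        · exact ⟨kv, h2, hk1, hv⟩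

-- membership in the inverted index: inner loop over one stage's id list
theorem mem_stagesOf_inner (ids : List String) (k : String) (d : PySem.Dict String (PySem.Set String))
    (v w : String) :
    (w ∈ PySem.Dict.getD (ids.foldl (fun d vid =>
        d.modify vid PySem.Set.empty (fun s => PySem.Set.add s k)) d) v PySem.Set.empty)
      ↔ w ∈ PySem.Dict.getD d v PySem.Set.empty ∨ (v ∈ ids ∧ w = k) := by
  induction ids generalizing d with
  | nil => simp
  | cons x xs ih =>
    simp only [List.foldl_cons]
    rw [ih, PySem.Dict.getD_modify]
    by_cases hvx : v = x
    · simp [hvx, PySem.Set.mem_add]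
      tauto
    · simp [hvx]

-- membership in the inverted index: outer loop
theorem mem_stagesOf_fold (L : List (String × List String)) (d : PySem.Dict String (PySem.Set String))
    (v w : String) :
    (w ∈ PySem.Dict.getD (L.foldl (fun d kv =>
        kv.2.foldl (fun d vid => d.modify vid PySem.Set.empty (fun s => PySem.Set.add s kv.1)) d) d)
        v PySem.Set.empty)
      ↔ w ∈ PySem.Dict.getD d v PySem.Set.empty ∨ ∃ kv ∈ L, kv.1 = w ∧ v ∈ kv.2 := by
  induction L generalizing d with
  | nil => simp
  | cons p rest ih =>
    simp only [List.foldl_cons]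
    rw [ih, mem_stagesOf_inner]
    constructor
    · rintro ((h | ⟨hv, rfl⟩) | ⟨kv, hkv, hk1, hv⟩)
      · exact Or.inl h
      · exact Or.inr ⟨p, by simp, rfl, hv⟩
      · exact Or.inr ⟨kv, by simp [hkv], hk1, hv⟩
    · rintro (h | ⟨kv, hkv, hk1, hv⟩)
      · exact Or.inl (Or.inl h)
      · rcases List.mem_cons.mp hkv with h1 | h2
        · subst h1; exact Or.inl (Or.inr ⟨hv, hk1.symm⟩)
        · exact Or.inr ⟨kv, h2, hk1, hv⟩

-- the bridge: k is a stage of v in the index  iff  v is in stage k's present set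
theorem stagesOf_bridge (spi : List (String × List String)) (hk : (spi.map Prod.fst).Nodup)
    (v k : String) :
    PySem.Set.contains (PySem.Dict.getD (stagesOf spi) v PySem.Set.empty) k
      = (spGet spi k).contains v := by
  rw [Bool.eq_iff_iff]
  rw [PySem.Set.contains_iff]
  rw [show ((spGet spi k).contains v = true) ↔ v ∈ spGet spi k from by simp]
  rw [stagesOf, mem_stagesOf_fold, mem_spGet spi hk]
  simp only [PySem.Dict.getD_empty]
  constructor
  · rintro (h | ⟨kv, hkv, hk1, hv⟩)
    · simp [PySem.Set.empty] at h
    · exact ⟨kv, hkv, hk1, hv⟩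
  · rintro ⟨kv, hkv, hk1, hv⟩; exact Or.inr ⟨kv, hkv, hk1, hv⟩

-- !(filter p l).isEmpty  is  l.any p
theorem not_isEmpty_filter (l : List String) (p : String → Bool) :
    (!(l.filter p).isEmpty) = l.any p := by
  induction l with
  | nil => simp
  | cons x xs ih => by_cases h : p x <;> simp [h, ih]

-- A's inner loop over one stage's present ids, on a pair accumulator
theorem pv_inner (nq : List String) (g : String → Bool) (P : List String) (a b : Int) :
    P.foldl (fun (acc2 : Int × Int) vid =>
        if !(nq.contains vid) then acc2
        else if g vid then (acc2.1 + 1, acc2.2 + 1) else acc2) (a, b)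
      = (a + ((P.filter (fun v => nq.contains v && g v)).length : Int),
         b + ((P.filter (fun v => nq.contains v && g v)).length : Int)) := by
  induction P generalizing a b with
  | nil => simp
  | cons x xs ih =>
    simp only [List.foldl_cons]
    by_cases h1 : nq.contains x = true
    · have h1' : x ∈ nq := by simpa using h1
      by_cases h2 : g x = true
      · rw [if_neg (by simp [h1']), if_pos h2, ih]
        simp only [List.filter_cons, h1, h2, Bool.and_self, if_true, List.length_cons,
          Prod.ext_iff]
        constructor <;> push_cast <;> ring
      · rw [if_neg (by simp [h1']), if_neg h2, ih]
        simp [h1', h2]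
    · have h1' : x ∉ nq := by simpa using h1
      rw [if_pos (by simp [h1']), ih]
      simp [h1']

-- A's outer loop as a sum of per-stage counts
theorem A_fold (nq : List String) (spi : List (String × List String))
    (L : List (String × List String)) (c : Int) :
    L.foldl (fun (acc : Int × Int) kv =>
      (spGet spi kv.1).foldl (fun (acc2 : Int × Int) vid =>
        if !(nq.contains vid) then acc2
        else if !((kv.2.filter (fun dep => !((spGet spi dep).contains vid))).isEmpty)
             then (acc2.1 + 1, acc2.2 + 1) else acc2) acc) (c, c)
      = (c + ((L.map (cntA nq spi)).sum : Int), c + ((L.map (cntA nq spi)).sum : Int)) := by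
  induction L generalizing c with
  | nil => simp
  | cons kv rest ih =>
    simp only [List.foldl_cons]
    rw [pv_inner nq
      (fun vid => !((kv.2.filter (fun dep => !((spGet spi dep).contains vid))).isEmpty))
      (spGet spi kv.1) c c]
    rw [ih]
    have hcnt : ((spGet spi kv.1).filter (fun v => nq.contains v &&
        !((kv.2.filter (fun dep => !((spGet spi dep).contains v))).isEmpty))).length
        = cntA nq spi kv := by
      unfold cntA
      congr 1
      apply List.filter_congr
      intro v _
      rw [not_isEmpty_filter]
    rw [hcnt]
    simp only [List.map_cons, List.sum_cons, Prod.ext_iff]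
    constructor <;> push_cast <;> ring

-- A as a sum of per-stage counts
theorem A_eq_sum (nq : List String) (spi : List (String × List String)) :
    compute_contract_health_py nq spi
      = (((pvDeps.map (cntA nq spi)).sum : Int), ((pvDeps.map (cntA nq spi)).sum : Int)) := by
  have h := A_fold nq spi pvDeps 0
  simp only [zero_add] at h
  unfold compute_contract_health_py
  exact h

-- B's inner loop over the dependency table, then the outer loop over videos
theorem B_fold (q : String → (String × List String) → Bool) (nq : List String) (c : Int) :
    nq.foldl (fun (c : Int) vid =>
        pvDeps.foldl (fun (c : Int) kv => if q vid kv then c + 1 else c) c) c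
      = c + ((nq.map (fun vid => pvDeps.countP (q vid))).sum : Int) := by
  induction nq generalizing c with
  | nil => simp
  | cons x xs ih =>
    simp only [List.foldl_cons]
    rw [PySem.List.foldl_count_if, ih, List.map_cons, List.sum_cons]
    push_cast
    ring

-- double counting: summing per-video matches over stages equals summing per-stage matches over videos
theorem sum_countP_swap (X : List String) (Y : List (String × List String))
    (q : String → (String × List String) → Bool) :
    (X.map (fun x => Y.countP (q x))).sum = (Y.map (fun y => X.countP (fun x => q x y))).sum := by
  induction Y with
  | nil => simp
  | cons y ys ih =>
    calc (X.map (fun x => (y :: ys).countP (q x))).sum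
        = (X.map (fun x => ys.countP (q x) + if q x y then 1 else 0)).sum := by
          simp [List.countP_cons]
      _ = (X.map (fun x => ys.countP (q x))).sum + (X.map (fun x => if q x y then 1 else 0)).sum :=
          List.sum_map_add
      _ = (X.map (fun x => ys.countP (q x))).sum + X.countP (fun x => q x y) := by
          rw [PySem.List.sum_map_ite_one_zero_nat]
      _ = ((y :: ys).map (fun y => X.countP (fun x => q x y))).sum := by
          rw [ih]; simp [Nat.add_comm]

-- B as a sum of per-stage counts
theorem B_eq_sum (nq : List String) (spi : List (String × List String)) :
    compute_contract_health_py_alt nq spi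
      = (((pvDeps.map (cntB nq spi)).sum : Int), ((pvDeps.map (cntB nq spi)).sum : Int)) := by
  have hdef : compute_contract_health_py_alt nq spi
      = (nq.foldl (fun (c : Int) vid =>
        pvDeps.foldl (fun (c : Int) kv =>
          if PySem.Set.contains (PySem.Dict.getD (stagesOf spi) vid PySem.Set.empty) kv.1 &&
             kv.2.any (fun d => !(PySem.Set.contains (PySem.Dict.getD (stagesOf spi) vid PySem.Set.empty) d))
          then c + 1 else c) c) 0,
         nq.foldl (fun (c : Int) vid =>
        pvDeps.foldl (fun (c : Int) kv =>
          if PySem.Set.contains (PySem.Dict.getD (stagesOf spi) vid PySem.Set.empty) kv.1 &&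
             kv.2.any (fun d => !(PySem.Set.contains (PySem.Dict.getD (stagesOf spi) vid PySem.Set.empty) d))
          then c + 1 else c) c) 0) := rfl
  rw [hdef, B_fold]
  have hswap := sum_countP_swap nq pvDeps (fun vid kv =>
    PySem.Set.contains (PySem.Dict.getD (stagesOf spi) vid PySem.Set.empty) kv.1 &&
    kv.2.any (fun d => !(PySem.Set.contains (PySem.Dict.getD (stagesOf spi) vid PySem.Set.empty) d)))
  rw [hswap]
  have hcnt : ∀ kv, nq.countP (fun v =>
      PySem.Set.contains (PySem.Dict.getD (stagesOf spi) v PySem.Set.empty) kv.1 &&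
      kv.2.any (fun d => !(PySem.Set.contains (PySem.Dict.getD (stagesOf spi) v PySem.Set.empty) d)))
      = cntB nq spi kv := by
    intro kv
    unfold cntB
    rw [List.countP_eq_length_filter]
  simp only [hcnt, zero_add]

-- counting the same pairs from either side of a nodup intersection
theorem filter_length_swap (X Y : List String) (hX : X.Nodup) (hY : Y.Nodup) (h : String → Bool) :
    (X.filter (fun v => Y.contains v && h v)).length
      = (Y.filter (fun v => X.contains v && h v)).length := by
  rw [← List.toFinset_card_of_nodup (hX.filter _), ← List.toFinset_card_of_nodup (hY.filter _),
    List.toFinset_filter, List.toFinset_filter]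
  congr 1
  ext a
  simp only [Finset.mem_filter, List.mem_toFinset, Bool.and_eq_true, List.contains_iff_mem]
  tauto

theorem cntA_eq_cntB (nq : List String) (spi : List (String × List String))
    (h1 : nq.Nodup) (h2 : (spi.map Prod.fst).Nodup) (h3 : ∀ kv ∈ spi, kv.2.Nodup)
    (kv : String × List String) : cntA nq spi kv = cntB nq spi kv := by
  unfold cntA cntB
  have hbridge : nq.filter (fun v =>
      PySem.Set.contains (PySem.Dict.getD (stagesOf spi) v PySem.Set.empty) kv.1 &&
      kv.2.any (fun d => !(PySem.Set.contains (PySem.Dict.getD (stagesOf spi) v PySem.Set.empty) d)))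
      = nq.filter (fun v => (spGet spi kv.1).contains v &&
          kv.2.any (fun d => !((spGet spi d).contains v))) := by
    apply List.filter_congr
    intro v _
    simp only [stagesOf_bridge spi h2]
  rw [hbridge]
  exact filter_length_swap (spGet spi kv.1) nq (spGet_nodup spi h3 kv.1) h1
    (fun v => kv.2.any (fun d => !((spGet spi d).contains v)))

-- ===== VERDICT (by name: the statement is the Claim_ definition above) =====
theorem compute_contract_health_py_spec : Claim_equal_compute_contract_health_py := by
  intro nq spi _ hpre
  obtain ⟨h1, h2, h3⟩ := hpre
  unfold Spec_compute_contract_health_py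
  rw [A_eq_sum, B_eq_sum]
  have : pvDeps.map (cntA nq spi) = pvDeps.map (cntB nq spi) :=
    List.map_congr_left (fun kv _ => cntA_eq_cntB nq spi h1 h2 h3 kv)
  rw [this]
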